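-- pv_equiv track=rewrite | github.com/jl532/Chilkoti_D4imaging | backend_einsteinUI.py | tolerantSortXYR
-- ===== SOURCE A (Python) =====
-- def tolerantSortXYR(listInput, tolerance):
--     """
--     Will sort entries in a list into a proper order with some tolerance
--     between values. Important when 2D image locations need to be sorted
--     into grid format when pixel locations are imprecise (vary by some tolerance)
--     in the case of the D4 array, this tolerance is around a diameter of the capture
--     spot.
--
--     listInput = list of [x, y, radius] circle location data
--     tolerance = radius of the circles (or diameter if more tolerant)
--
--     output = sorted list by Y (with tolerance) and X (With tolerance)
--     """
--
--     sortedByWhy = sorted(listInput, key = lambda x: x[1])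
--     firstYCoord = sortedByWhy[0][1]
--     sortedOutput = []
--     yRowList = []
--     for each in sortedByWhy:
--         if (abs(each[1]-firstYCoord) < tolerance):
--             yRowList.append(each)
--         else:
--             xSortedRow = sorted(yRowList, key = lambda x: x[0])
--             sortedOutput = sortedOutput + xSortedRow
--             yRowList = []
--             firstYCoord = each[1]
--             yRowList.append(each)
--     xSortedRow = sorted(yRowList, key = lambda x: x[0])
--     sortedOutput = sortedOutput + xSortedRow
--     return sortedOutput
-- ===== SOURCE B (Python) =====
-- def tolerantSortXYR(listInput, tolerance):
--     """Label each point with an integer row number in one pass over the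
--     Y-sorted list, then do a single stable sort by the composite key
--     (row label, x) instead of sorting each row separately."""
--     byY = sorted(listInput, key=lambda p: p[1])
--     ref = byY[0][1]
--     labeled = []
--     lab = 0
--     for p in byY:
--         if abs(p[1] - ref) >= tolerance:
--             lab += 1
--             ref = p[1]
--         labeled.append((lab, p))
--     return [p for _, p in sorted(labeled, key=lambda t: (t[0], t[1][0]))]
-- ===== Notes on version B (the rewrite author's own statement) =====
-- stated objective: alternative
-- what changed: Replaces A's flush-per-row state machine (accumulate a row, sort it by X, concatenate) by a row-labelling pass over the Y-sorted list followed by ONE stable sort with the composite key (row label, x); per-row sorts and list concatenations disappear.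
import Mathlib
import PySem

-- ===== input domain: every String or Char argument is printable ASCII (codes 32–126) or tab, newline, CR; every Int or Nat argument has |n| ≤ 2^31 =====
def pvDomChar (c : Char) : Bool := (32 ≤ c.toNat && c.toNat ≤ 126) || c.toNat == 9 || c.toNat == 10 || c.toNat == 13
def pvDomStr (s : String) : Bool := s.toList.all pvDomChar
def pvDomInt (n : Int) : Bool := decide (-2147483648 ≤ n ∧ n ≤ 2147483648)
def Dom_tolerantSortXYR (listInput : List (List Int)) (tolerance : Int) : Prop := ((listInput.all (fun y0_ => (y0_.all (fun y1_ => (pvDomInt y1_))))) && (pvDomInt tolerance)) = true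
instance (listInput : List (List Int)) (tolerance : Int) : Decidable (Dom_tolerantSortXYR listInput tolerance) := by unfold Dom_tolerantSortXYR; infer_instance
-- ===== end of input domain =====

-- B replaces A's flush-per-row state machine by a row-labelling pass over the Y-sorted list
-- followed by ONE stable sort with the composite key (row label, x). Objective: alternative.
-- Return-value equivalence only; neither program mutates its input.

-- p[1] / p[0]; under Pre_ every element has length >= 2 so the default is never used
def pvY (p : List Int) : Int := PySem.List.pyGetD p 1 0
def pvX (p : List Int) : Int := PySem.List.pyGetD p 0 0

-- ===== PORT A =====
def tolerantSortXYR (listInput : List (List Int)) (tolerance : Int) : List (List Int) :=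
  let sortedByWhy := PySem.List.sorted listInput pvY false
  let firstYCoord := pvY (PySem.List.pyGetD sortedByWhy 0 [])   -- sortedByWhy[0][1]; IndexError on [] excluded by Pre_
  let st := sortedByWhy.foldl
    (fun (s : List (List Int) × List (List Int) × Int) each =>
      if |pvY each - s.2.2| < tolerance then (s.1, s.2.1 ++ [each], s.2.2)
      else (s.1 ++ PySem.List.sorted s.2.1 pvX false, [each], pvY each))
    ([], [], firstYCoord)
  st.1 ++ PySem.List.sorted st.2.1 pvX false

-- ===== PORT B =====
def tolerantSortXYR_alt (listInput : List (List Int)) (tolerance : Int) : List (List Int) :=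
  let byY := PySem.List.sorted listInput pvY false
  let ref0 := pvY (PySem.List.pyGetD byY 0 [])                  -- byY[0][1]; IndexError on [] excluded by Pre_
  let st := byY.foldl
    (fun (s : List (Int × List Int) × Int × Int) p =>
      if tolerance ≤ |pvY p - s.2.2| then (s.1 ++ [(s.2.1 + 1, p)], s.2.1 + 1, pvY p)
      else (s.1 ++ [(s.2.1, p)], s.2.1, s.2.2))
    ([], 0, ref0)
  (PySem.List.sorted2 st.1 (fun t => t.1) (fun t => pvX t.2) false).map (fun t => t.2)

-- ===== PRECONDITION & SPEC =====
-- A raises IndexError on the empty list (sortedByWhy[0]) and on any element of length < 2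
-- (the sort key x[1]); exactly those inputs are excluded.
def Pre_tolerantSortXYR (listInput : List (List Int)) (_tolerance : Int) : Prop :=
  listInput ≠ [] ∧ ∀ p ∈ listInput, 2 ≤ p.length
instance (listInput : List (List Int)) (tolerance : Int) : Decidable (Pre_tolerantSortXYR listInput tolerance) := by unfold Pre_tolerantSortXYR; infer_instance
def pvWitness_tolerantSortXYR : List (List Int) × Int := ([[1, 0, 5], [0, 1, 5], [7, 9, 5]], 3)

def Spec_tolerantSortXYR (listInput : List (List Int)) (tolerance : Int) (out : List (List Int)) : Prop := out = tolerantSortXYR_alt listInput tolerance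
instance (listInput : List (List Int)) (tolerance : Int) (out : List (List Int)) : Decidable (Spec_tolerantSortXYR listInput tolerance out) := by unfold Spec_tolerantSortXYR; infer_instance

-- ===== CLAIM (what is proved, stated in full; the proofs are below) =====
def Claim_equal_tolerantSortXYR : Prop := ∀ (listInput : List (List Int)) (tolerance : Int), Dom_tolerantSortXYR listInput tolerance → Pre_tolerantSortXYR listInput tolerance → Spec_tolerantSortXYR listInput tolerance (tolerantSortXYR listInput tolerance)

-- ===== LEMMAS AND PROOFS =====

-- A-proof helper: the row peeling A's loop performs, written as a recursion.
def pvRows (tol : Int) : List (List Int) → List (List Int)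
  | [] => []
  | p :: rest =>
    PySem.List.sorted (p :: rest.takeWhile (fun q => decide (|pvY q - pvY p| < tol))) pvX false
      ++ pvRows tol (rest.dropWhile (fun q => decide (|pvY q - pvY p| < tol)))
  termination_by l => l.length
  decreasing_by
    have := List.length_dropWhile_le (fun q => decide (|pvY q - pvY p| < tol)) rest
    simp; omega

-- B-proof helper: the labelled list B's first pass builds, written as a recursion.
def pvLab (tol : Int) : Int → Int → List (List Int) → List (Int × List Int)
  | _, _, [] => []
  | lab, ref, p :: rest =>
    if tol ≤ |pvY p - ref| then (lab + 1, p) :: pvLab tol (lab + 1) (pvY p) rest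
    else (lab, p) :: pvLab tol lab ref rest

-- A's loop, started in state (out, row, ref), flushes to
-- out ++ sortX(row ++ leading run within tolerance of ref) ++ peel of the rest.
theorem pv_foldl_flush (tol : Int) (s : List (List Int)) : ∀ (out row : List (List Int)) (ref : Int),
    (let st := s.foldl
      (fun (st : List (List Int) × List (List Int) × Int) each =>
        if |pvY each - st.2.2| < tol then (st.1, st.2.1 ++ [each], st.2.2)
        else (st.1 ++ PySem.List.sorted st.2.1 pvX false, [each], pvY each))
      (out, row, ref)
     st.1 ++ PySem.List.sorted st.2.1 pvX false)
    = out ++ PySem.List.sorted (row ++ s.takeWhile (fun q => decide (|pvY q - ref| < tol))) pvX false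
        ++ pvRows tol (s.dropWhile (fun q => decide (|pvY q - ref| < tol))) := by
  induction s with
  | nil => intro out row ref; simp [pvRows]
  | cons q rest ih =>
    intro out row ref
    by_cases h : |pvY q - ref| < tol
    · simp only [List.foldl_cons, h, if_pos, List.takeWhile_cons, List.dropWhile_cons]
      rw [ih]
      simp [List.append_assoc]
    · simp only [List.foldl_cons, if_neg h, List.takeWhile_cons, List.dropWhile_cons,
        decide_eq_false h]
      rw [ih]
      simp [pvRows]

-- B's labelling loop computes pvLab.
theorem pv_lab_foldl (tol : Int) (s : List (List Int)) : ∀ (acc : List (Int × List Int)) (lab ref : Int),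
    (s.foldl
      (fun (st : List (Int × List Int) × Int × Int) p =>
        if tol ≤ |pvY p - st.2.2| then (st.1 ++ [(st.2.1 + 1, p)], st.2.1 + 1, pvY p)
        else (st.1 ++ [(st.2.1, p)], st.2.1, st.2.2))
      (acc, lab, ref)).1
    = acc ++ pvLab tol lab ref s := by
  induction s with
  | nil => intro acc lab ref; simp [pvLab]
  | cons p rest ih =>
    intro acc lab ref
    by_cases h : tol ≤ |pvY p - ref|
    · simp only [List.foldl_cons, if_pos h]
      rw [ih]
      simp [pvLab, h]
    · simp only [List.foldl_cons, if_neg h]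
      rw [ih]
      simp [pvLab, h]

-- pvLab splits at the first element out of tolerance of ref.
theorem pv_lab_split (tol lab ref : Int) (s : List (List Int)) :
    pvLab tol lab ref s
      = (s.takeWhile (fun q => decide (|pvY q - ref| < tol))).map (fun p => (lab, p))
        ++ pvLab tol lab ref (s.dropWhile (fun q => decide (|pvY q - ref| < tol))) := by
  induction s with
  | nil => simp
  | cons p rest ih =>
    by_cases h : |pvY p - ref| < tol
    · have h' : ¬ tol ≤ |pvY p - ref| := by omega
      simp only [List.takeWhile_cons, List.dropWhile_cons, decide_eq_true h, pvLab, if_neg h']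
      simpa using ih
    · have h' : tol ≤ |pvY p - ref| := by omega
      simp [decide_eq_false h]

-- every label pvLab assigns is at least the starting label
theorem pv_lab_ge (tol : Int) (s : List (List Int)) : ∀ (lab ref : Int), ∀ x ∈ pvLab tol lab ref s, lab ≤ x.1 := by
  induction s with
  | nil => intro lab ref x hx; simp [pvLab] at hx
  | cons p rest ih =>
    intro lab ref x hx
    by_cases h : tol ≤ |pvY p - ref|
    · simp only [pvLab, if_pos h, List.mem_cons] at hx
      rcases hx with rfl | hx
      · simp
      · have := ih (lab + 1) (pvY p) x hx; omega
    · simp only [pvLab, if_neg h, List.mem_cons] at hx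
      rcases hx with rfl | hx
      · simp
      · exact ih lab ref x hx

-- past the dropWhile boundary every label strictly exceeds the block's label
theorem pv_lab_drop_gt (tol lab ref : Int) (s : List (List Int)) :
    ∀ x ∈ pvLab tol lab ref (s.dropWhile (fun q => decide (|pvY q - ref| < tol))), lab + 1 ≤ x.1 := by
  intro x hx
  rcases hD : s.dropWhile (fun q => decide (|pvY q - ref| < tol)) with _ | ⟨q, dr⟩
  · rw [hD] at hx; simp [pvLab] at hx
  · have hne : s.dropWhile (fun q => decide (|pvY q - ref| < tol)) ≠ [] := by rw [hD]; simp
    have hq := List.head_dropWhile_not (fun q => decide (|pvY q - ref| < tol)) hne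
    simp only [hD, List.head_cons, decide_eq_false_iff_not, not_lt] at hq
    rw [hD] at hx
    have hq' : tol ≤ |pvY q - ref| := hq
    simp only [pvLab, if_pos hq', List.mem_cons] at hx
    rcases hx with rfl | hx
    · simp
    · exact pv_lab_ge tol dr (lab + 1) (pvY q) x hx

-- insertBy skips a prefix none of whose elements x goes before
theorem pv_insertBy_skip {α : Type} (b : α → α → Bool) (x : α) :
    ∀ (s t : List α), (∀ a ∈ s, b x a = false) → PySem.List.insertBy b x (s ++ t) = s ++ PySem.List.insertBy b x t := by
  intro s
  induction s with
  | nil => intro t _; simp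
  | cons a s ih =>
    intro t h
    have ha := h a (by simp)
    simp only [List.cons_append, PySem.List.insertBy, ha, Bool.false_eq_true, if_false]
    rw [ih t (fun a' ha' => h a' (by simp [ha']))]

-- membership through a fold of insertBy
theorem pv_mem_foldl_insertBy {α : Type} (b : α → α → Bool) :
    ∀ (l : List α) (acc : List α) (y : α), y ∈ l.foldl (fun acc x => PySem.List.insertBy b x acc) acc → y ∈ acc ∨ y ∈ l := by
  intro l
  induction l with
  | nil => intro acc y hy; exact Or.inl hy
  | cons x l ih =>
    intro acc y hy
    rcases ih _ y hy with h | h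
    · rcases (PySem.List.mem_insertBy _ _ _ _).1 h with rfl | h
      · exact Or.inr (by simp)
      · exact Or.inl h
    · exact Or.inr (by simp [h])

-- a fold of insertBy keeps a prefix no inserted element goes before
theorem pv_foldl_insertBy_prefix {α : Type} (b : α → α → Bool) :
    ∀ (l : List α) (s t : List α), (∀ x ∈ l, ∀ a ∈ s, b x a = false) →
      l.foldl (fun acc x => PySem.List.insertBy b x acc) (s ++ t)
        = s ++ l.foldl (fun acc x => PySem.List.insertBy b x acc) t := by
  intro l
  induction l with
  | nil => intro s t _; rfl
  | cons x l ih =>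
    intro s t h
    simp only [List.foldl_cons]
    rw [pv_insertBy_skip b x s t (h x (by simp)), ih s _ (fun x' hx' => h x' (by simp [hx']))]

-- the stable composite-key sort splits over blocks of strictly increasing first key
theorem pv_sorted2_split (L1 L2 : List (Int × List Int)) (h : ∀ x ∈ L2, ∀ a ∈ L1, a.1 < x.1) :
    PySem.List.sorted2 (L1 ++ L2) (fun t => t.1) (fun t => pvX t.2) false
      = PySem.List.sorted2 L1 (fun t => t.1) (fun t => pvX t.2) false
        ++ PySem.List.sorted2 L2 (fun t => t.1) (fun t => pvX t.2) false := by
  simp only [PySem.List.sorted2, Bool.false_eq_true, if_false, List.foldl_append]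
  rw [← List.append_nil (List.foldl _ [] L1)]
  rw [pv_foldl_insertBy_prefix]
  · simp
  · intro x hx a ha
    rcases pv_mem_foldl_insertBy _ L1 [] a ha with h' | h'
    · simp at h'
    · have hlt := h x hx a h'
      have h1 : ¬ x.1 < a.1 := by omega
      simp [h1, hlt]

-- sorting a constant-label block by (label, x) is the x-sort, relabelled
theorem pv_sorted2_const (c : Int) (T : List (List Int)) :
    PySem.List.sorted2 (T.map (fun p => (c, p))) (fun t => t.1) (fun t => pvX t.2) false
      = (PySem.List.sorted T pvX false).map (fun p => (c, p)) := by
  simp only [PySem.List.sorted2, PySem.List.sorted, Bool.false_eq_true, if_false]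
  have aux : ∀ (x : List Int) (S : List (List Int)),
      PySem.List.insertBy (fun a b => decide (a.1 < b.1) || !decide (b.1 < a.1) && decide (pvX a.2 < pvX b.2))
        ((c, x) : Int × List Int) (S.map (fun p => (c, p)))
      = (PySem.List.insertBy (fun a b => decide (pvX a < pvX b)) x S).map (fun p => (c, p)) := by
    intro x S
    induction S with
    | nil => simp [PySem.List.insertBy]
    | cons a S ih =>
      by_cases hx : pvX x < pvX a
      · simp [PySem.List.insertBy, hx]
      · simp [PySem.List.insertBy, hx, ih]
  suffices hgen : ∀ (T : List (List Int)) (S : List (List Int)),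
      List.foldl (fun acc x => PySem.List.insertBy (fun a b => decide (a.1 < b.1) || !decide (b.1 < a.1) && decide (pvX a.2 < pvX b.2)) x acc)
        (S.map (fun p => (c, p))) (T.map (fun p => (c, p)))
      = (List.foldl (fun acc x => PySem.List.insertBy (fun a b => decide (pvX a < pvX b)) x acc) S T).map (fun p => (c, p)) by
    simpa using hgen T []
  intro T
  induction T with
  | nil => intro S; rfl
  | cons x T ih =>
    intro S
    simp only [List.map_cons, List.foldl_cons]
    rw [aux x S, ih]

-- takeWhile finds nothing after its own dropWhile
theorem pv_takeWhile_dropWhile {α : Type} (p : α → Bool) (l : List α) :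
    (l.dropWhile p).takeWhile p = [] := by
  rcases hD : l.dropWhile p with _ | ⟨q, dr⟩
  · rfl
  · have hne : l.dropWhile p ≠ [] := by rw [hD]; simp
    have hq := List.head_dropWhile_not p hne
    simp only [hD, List.head_cons] at hq
    simp [hq]

-- MAIN: sorting pvLab's output by (label, x) and stripping labels is exactly A's peel
theorem pv_lab_sorted (tol : Int) : ∀ (n : Nat) (s : List (List Int)), s.length ≤ n → ∀ (lab ref : Int),
    (PySem.List.sorted2 (pvLab tol lab ref s) (fun t => t.1) (fun t => pvX t.2) false).map (fun t => t.2)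
      = PySem.List.sorted (s.takeWhile (fun q => decide (|pvY q - ref| < tol))) pvX false
        ++ pvRows tol (s.dropWhile (fun q => decide (|pvY q - ref| < tol))) := by
  intro n
  induction n with
  | zero =>
    intro s hs lab ref
    have : s = [] := List.eq_nil_of_length_eq_zero (by omega)
    subst this
    simp [pvLab, pvRows, PySem.List.sorted2, PySem.List.sorted]
  | succ n ih =>
    intro s hs lab ref
    cases s with
    | nil => simp [pvLab, pvRows, PySem.List.sorted2, PySem.List.sorted]
    | cons p rest =>
      by_cases hp : |pvY p - ref| < tol
      · -- p starts (or continues) the current block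
        rw [pv_lab_split tol lab ref (p :: rest)]
        rw [pv_sorted2_split _ _ (by
          intro x hx a ha
          rcases List.mem_map.1 ha with ⟨a', _, rfl⟩
          have := pv_lab_drop_gt tol lab ref (p :: rest) x hx
          simpa using by omega)]
        rw [pv_sorted2_const]
        have hD : ((p :: rest).dropWhile (fun q => decide (|pvY q - ref| < tol))).length ≤ n := by
          have h1 := List.length_dropWhile_le (fun q => decide (|pvY q - ref| < tol)) rest
          have h2 : (p :: rest).dropWhile (fun q => decide (|pvY q - ref| < tol))
              = rest.dropWhile (fun q => decide (|pvY q - ref| < tol)) := by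
            simp [hp]
          rw [h2]
          simp at hs
          omega
        rw [List.map_append, List.map_map]
        have hid : ((fun t : Int × List Int => t.2) ∘ (fun p => (lab, p))) = id := rfl
        rw [hid, List.map_id]
        rw [ih _ hD lab ref]
        rw [pv_takeWhile_dropWhile, List.dropWhile_idempotent]
        simp [PySem.List.sorted]
      · -- p opens a new block: label bumps, ref becomes pvY p
        have hp' : tol ≤ |pvY p - ref| := by omega
        have hunfold : pvLab tol lab ref (p :: rest)
            = ((p :: rest.takeWhile (fun q => decide (|pvY q - pvY p| < tol))).map (fun q => (lab + 1, q)))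
              ++ pvLab tol (lab + 1) (pvY p) (rest.dropWhile (fun q => decide (|pvY q - pvY p| < tol))) := by
          simp only [pvLab, if_pos hp']
          rw [pv_lab_split tol (lab + 1) (pvY p) rest]
          simp
        rw [hunfold]
        rw [pv_sorted2_split _ _ (by
          intro x hx a ha
          rcases List.mem_map.1 ha with ⟨a', _, rfl⟩
          have := pv_lab_drop_gt tol (lab + 1) (pvY p) rest x hx
          simpa using by omega)]
        rw [pv_sorted2_const]
        have hD : (rest.dropWhile (fun q => decide (|pvY q - pvY p| < tol))).length ≤ n := by
          have h1 := List.length_dropWhile_le (fun q => decide (|pvY q - pvY p| < tol)) rest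
          simp at hs
          omega
        rw [List.map_append, List.map_map]
        have hid : ((fun t : Int × List Int => t.2) ∘ (fun q => (lab + 1, q))) = id := rfl
        rw [hid, List.map_id]
        rw [ih _ hD (lab + 1) (pvY p)]
        rw [pv_takeWhile_dropWhile, List.dropWhile_idempotent]
        simp only [List.takeWhile_cons, List.dropWhile_cons, decide_eq_false hp]
        simp [pvRows, PySem.List.sorted]

-- ===== VERDICT (by name: the statement is the Claim_ definition above) =====
theorem tolerantSortXYR_spec : Claim_equal_tolerantSortXYR := by
  unfold Claim_equal_tolerantSortXYR
  intro listInput tolerance _ _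
  unfold Spec_tolerantSortXYR tolerantSortXYR tolerantSortXYR_alt
  dsimp only
  rw [pv_foldl_flush, pv_lab_foldl]
  simp only [List.nil_append]
  rw [pv_lab_sorted tolerance (PySem.List.sorted listInput pvY false).length _ le_rfl]
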